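-- pv_equiv track=rewrite | github.com/low101043/advent-of-code | 2015/day5/parttwo.py | checkNiceness
-- ===== SOURCE A (Python) =====
-- def checkNiceness(string):
--     repeat = False
--     overlapping = {}
--     overlapping_final = False
--
--     for i in range(len(string)):
--         letter = string[i]
--         if i + 1 >= len(string):
--             pass
--         else:
--             keyLetters = letter + string[i+1]
--             key = (keyLetters, i, i + 1)
--             if keyLetters not in overlapping.keys():
--                 overlapping[keyLetters] = key
--             else:
--                 old_info = overlapping[keyLetters]
--                 if (old_info[2] != key[1]):
--                     overlapping_final = True
--
--
--         if i + 1 >= len(string) or i + 2 >= len(string):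
--             pass
--         else:
--             if letter == string[i+2]:
--                 repeat = True
--
--     return repeat and overlapping_final
-- ===== SOURCE B (Python) =====
-- def checkNiceness(string):
--     s = string
--     gap = any(s[i] == s[i + 2] for i in range(len(s) - 2))
--     pair = any(s[i:i + 2] in s[i + 2:] for i in range(len(s) - 1))
--     return gap and pair
-- ===== Notes on version B (the rewrite author's own statement) =====
-- stated objective: idiomatic
-- what changed: A's single loop maintaining a pair->(key,i,i+1) dictionary and two flags is replaced by two independent any() scans: s[i]==s[i+2] for the gap repeat, and s[i:i+2] in s[i+2:] substring search for the non-overlapping duplicate pair.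
import Mathlib
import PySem

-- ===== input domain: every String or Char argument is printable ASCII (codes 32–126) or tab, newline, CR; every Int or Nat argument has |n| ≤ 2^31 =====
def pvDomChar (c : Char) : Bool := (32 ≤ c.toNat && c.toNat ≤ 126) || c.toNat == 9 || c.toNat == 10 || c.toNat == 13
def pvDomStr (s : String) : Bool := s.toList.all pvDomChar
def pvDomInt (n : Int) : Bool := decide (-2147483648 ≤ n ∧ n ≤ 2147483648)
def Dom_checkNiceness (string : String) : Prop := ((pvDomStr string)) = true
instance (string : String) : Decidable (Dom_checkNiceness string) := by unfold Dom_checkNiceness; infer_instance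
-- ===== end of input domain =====

-- B replaces A's single loop with its maintained pair→(key, index) dictionary by two independent
-- `any` scans (gap repeat s[i]==s[i+2] by index; duplicate pair by substring search in the tail);
-- objective: idiomatic; the scans stop at the first witness, where A always walks the whole string.

-- ===== PORT A =====
def checkNicenessStep (cs : List Char) (n : Int)
    (st : Bool × PySem.Dict String (String × Int × Int) × Bool) (i : Int) :
    Bool × PySem.Dict String (String × Int × Int) × Bool :=
  let rep := st.1
  let ov := st.2.1
  let ovf := st.2.2
  let letter := PySem.List.pyGetD cs i ' '
  let p :=
    if i + 1 ≥ n then (ov, ovf)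
    else
      let keyLetters := String.ofList [letter, PySem.List.pyGetD cs (i + 1) ' ']
      let key : String × Int × Int := (keyLetters, i, i + 1)
      if ¬ (ov.contains keyLetters = true) then (ov.insert keyLetters key, ovf)
      else
        match ov.get? keyLetters with
        | some old_info => if old_info.2.2 ≠ key.2.1 then (ov, true) else (ov, ovf)
        | none => (ov, ovf)
  let rep' :=
    if i + 1 ≥ n ∨ i + 2 ≥ n then rep
    else if letter = PySem.List.pyGetD cs (i + 2) ' ' then true else rep
  (rep', p.1, p.2)

def checkNiceness (string : String) : Bool :=
  let cs := string.toList
  let n := PySem.Str.len string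
  let st := (PySem.List.pyRange 0 n).foldl (checkNicenessStep cs n)
      (false, PySem.Dict.empty, false)
  st.1 && st.2.2

-- ===== PORT B =====
def checkNiceness_alt (string : String) : Bool :=
  let cs := string.toList
  let n := PySem.Str.len string
  let gap := (PySem.List.pyRange 0 (n - 2)).any (fun i =>
    PySem.List.pyGetD cs i ' ' == PySem.List.pyGetD cs (i + 2) ' ')
  let pair := (PySem.List.pyRange 0 (n - 1)).any (fun i =>
    PySem.Chars.isIn (PySem.List.slice cs (some i) (some (i + 2)))
      (PySem.List.slice cs (some (i + 2)) none))
  gap && pair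

-- ===== PRECONDITION & SPEC =====
def Spec_checkNiceness (string : String) (out : Bool) : Prop := out = checkNiceness_alt string
instance (string : String) (out : Bool) : Decidable (Spec_checkNiceness string out) := by unfold Spec_checkNiceness; infer_instance

-- ===== CLAIM (what is proved, stated in full; the proofs are below) =====
def Claim_equal_checkNiceness : Prop := ∀ (string : String), Dom_checkNiceness string → Spec_checkNiceness string (checkNiceness string)

-- ===== LEMMAS AND PROOFS =====

def keyStr (cs : List Char) (j : Nat) : String :=
  String.ofList [cs.getD j ' ', cs.getD (j + 1) ' ']

abbrev GapUpto (cs : List Char) (i : Nat) : Prop :=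
  ∃ k < i, k + 2 < cs.length ∧ cs.getD k ' ' = cs.getD (k + 2) ' '

abbrev PairUpto (cs : List Char) (i : Nat) : Prop :=
  ∃ k < i, ∃ j < k, j + 2 ≤ k ∧ k + 1 < cs.length ∧
    cs.getD j ' ' = cs.getD k ' ' ∧ cs.getD (j + 1) ' ' = cs.getD (k + 1) ' '



def DictInv (cs : List Char) (i : Nat) (d : PySem.Dict String (String × Int × Int)) : Prop :=
  (∀ p, d.contains p = true ↔ ∃ j, j < min i (cs.length - 1) ∧ keyStr cs j = p) ∧
  (∀ p v, d.get? p = some v →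
    ∃ j, j < min i (cs.length - 1) ∧ keyStr cs j = p ∧
      (∀ j', j' < j → keyStr cs j' ≠ p) ∧ v = (p, (j : Int), (j : Int) + 1))

lemma keyStr_inj {cs : List Char} {j k : Nat} (h : keyStr cs j = keyStr cs k) :
    cs.getD j ' ' = cs.getD k ' ' ∧ cs.getD (j + 1) ' ' = cs.getD (k + 1) ' ' := by
  unfold keyStr at h
  have := congrArg String.toList h
  simp [String.toList_ofList] at this
  exact this

lemma keyStr_congr {cs : List Char} {j k : Nat}
    (h1 : cs.getD j ' ' = cs.getD k ' ') (h2 : cs.getD (j + 1) ' ' = cs.getD (k + 1) ' ') :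
    keyStr cs j = keyStr cs k := by
  unfold keyStr; rw [h1, h2]

lemma gapUpto_succ (cs : List Char) (i : Nat) :
    GapUpto cs (i + 1) ↔ (i + 2 < cs.length ∧ cs.getD i ' ' = cs.getD (i + 2) ' ') ∨ GapUpto cs i := by
  constructor
  · rintro ⟨k, hk, h2, h3⟩
    rcases Nat.lt_or_ge k i with hki | hki
    · exact Or.inr ⟨k, hki, h2, h3⟩
    · have : k = i := by omega
      subst this; exact Or.inl ⟨h2, h3⟩
  · rintro (⟨h2, h3⟩ | ⟨k, hk, h2, h3⟩)
    · exact ⟨i, by omega, h2, h3⟩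
    · exact ⟨k, by omega, h2, h3⟩

lemma pairUpto_succ (cs : List Char) (i : Nat) :
    PairUpto cs (i + 1) ↔
      (i + 1 < cs.length ∧ ∃ j, j + 2 ≤ i ∧ cs.getD j ' ' = cs.getD i ' ' ∧
        cs.getD (j + 1) ' ' = cs.getD (i + 1) ' ') ∨ PairUpto cs i := by
  constructor
  · rintro ⟨k, h2, j, hjk, h1, h3, h4, h5⟩
    rcases Nat.lt_or_ge k i with hki | hki
    · exact Or.inr ⟨k, hki, j, hjk, h1, h3, h4, h5⟩
    · have : k = i := by omega
      subst this; exact Or.inl ⟨h3, j, h1, h4, h5⟩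
  · rintro (⟨h3, j, h1, h4, h5⟩ | ⟨k, h2, j, hjk, h1, h3, h4, h5⟩)
    · exact ⟨i, by omega, j, by omega, h1, h3, h4, h5⟩
    · exact ⟨k, by omega, j, hjk, h1, h3, h4, h5⟩

lemma invariant (cs : List Char) :
    ∀ i, i ≤ cs.length →
      ∃ d, ((List.range i).foldl
          (fun (st : Bool × PySem.Dict String (String × Int × Int) × Bool) (k : Nat) => checkNicenessStep cs (cs.length : Int) st (k : Int))
          (false, PySem.Dict.empty, false))
        = (decide (GapUpto cs i), d, decide (PairUpto cs i)) ∧ DictInv cs i d := by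
  intro i
  induction i with
  | zero =>
    intro _
    refine ⟨PySem.Dict.empty, ?_, ?_, ?_⟩
    · have hg : ¬ GapUpto cs 0 := by rintro ⟨k, hk, -⟩; omega
      have hp : ¬ PairUpto cs 0 := by rintro ⟨k, hk, -⟩; omega
      simp [hg, hp]
    · intro p
      simp [PySem.Dict.contains_empty]
    · intro p v h
      simp [PySem.Dict.get?_empty] at h
  | succ i ih =>
    intro hle
    obtain ⟨d, hf, hc, hg⟩ := ih (by omega)
    have hin : i < cs.length := by omega
    rw [List.range_succ, List.foldl_append, hf]
    simp only [List.foldl_cons, List.foldl_nil]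
    -- reduce the step on the literal triple
    simp only [checkNicenessStep]
    have e1 : ((i : Int) + 1) = ((i + 1 : Nat) : Int) := by push_cast; ring
    have e2 : ((i : Int) + 2) = ((i + 2 : Nat) : Int) := by push_cast; ring
    -- the gap flag update equals decide (GapUpto cs (i+1))
    have hgapflag :
        (if ((i : Int) + 1 ≥ (cs.length : Int)) ∨ ((i : Int) + 2 ≥ (cs.length : Int))
          then decide (GapUpto cs i)
          else if PySem.List.pyGetD cs i ' ' = PySem.List.pyGetD cs ((i : Int) + 2) ' ' then true
            else decide (GapUpto cs i)) = decide (GapUpto cs (i + 1)) := by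
      by_cases h2 : i + 2 ≤ cs.length - 0 ∧ i + 2 < cs.length
      · rw [if_neg (by omega)]
        rw [e2]
        simp only [PySem.List.pyGetD_natCast]
        by_cases heq : cs.getD i ' ' = cs.getD (i + 2) ' '
        · rw [if_pos heq]
          exact (decide_eq_true ((gapUpto_succ cs i).2 (Or.inl ⟨h2.2, heq⟩))).symm
        · rw [if_neg heq]
          apply decide_eq_decide.mpr
          rw [gapUpto_succ]
          constructor
          · rintro h; exact Or.inr h
          · rintro (⟨-, h⟩ | h); exact absurd h heq; exact h
      · have hge : i + 2 ≥ cs.length := by omega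
        rw [if_pos (by omega)]
        apply decide_eq_decide.mpr
        rw [gapUpto_succ]
        constructor
        · rintro h; exact Or.inr h
        · rintro (⟨hlt, -⟩ | h); omega; exact h
    rw [hgapflag]
    by_cases hlast : ((i : Int) + 1 ≥ (cs.length : Int))
    · -- i + 1 = cs.length : the pair machinery is skipped in this iteration
      rw [if_pos hlast]
      have hpe : decide (PairUpto cs i) = decide (PairUpto cs (i + 1)) := by
        apply decide_eq_decide.mpr
        constructor
        · rintro ⟨k, h2, j, hjk, h1, h3, h4, h5⟩; exact ⟨k, by omega, j, hjk, h1, h3, h4, h5⟩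
        · intro h
          rcases (pairUpto_succ cs i).mp h with ⟨hbad, -⟩ | h
          · omega
          · exact h
      rw [hpe]
      refine ⟨d, rfl, ?_⟩
      unfold DictInv
      have hmin : min (i + 1) (cs.length - 1) = min i (cs.length - 1) := by omega
      rw [hmin]
      exact ⟨hc, hg⟩
    · have hlt : i + 1 < cs.length := by
        by_contra hcon
        exact hlast (by omega)
      rw [if_neg hlast]
      simp only [e1, PySem.List.pyGetD_natCast]
      rw [show (String.ofList [cs.getD i ' ', cs.getD (i + 1) ' ']) = keyStr cs i from rfl]
      by_cases hct : d.contains (keyStr cs i) = true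
      · -- the pair was seen before: compare with its FIRST occurrence
        rw [if_neg (by simp [hct])]
        have hsome : (d.get? (keyStr cs i)).isSome := by
          rw [← PySem.Dict.contains_eq_isSome_get?]; exact hct
        obtain ⟨v, hv⟩ := Option.isSome_iff_exists.mp hsome
        obtain ⟨j₀, hj₀lt, hj₀key, hj₀min, hveq⟩ := hg _ v hv
        subst hveq
        rw [hv]
        dsimp only
        have hdinv : DictInv cs (i + 1) d := by
          refine ⟨fun p => ?_, fun p w hw => ?_⟩
          · constructor
            · intro h
              obtain ⟨j, hj, hk⟩ := (hc p).mp h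
              exact ⟨j, by omega, hk⟩
            · rintro ⟨j, hj, hk⟩
              rcases Nat.lt_or_ge j i with h | h
              · exact (hc p).mpr ⟨j, by omega, hk⟩
              · have hji : j = i := by omega
                subst hji; subst hk
                exact hct
          · obtain ⟨j, hj, h2, h3, h4⟩ := hg p w hw
            exact ⟨j, by omega, h2, h3, h4⟩
        by_cases hj : j₀ + 1 = i
        · rw [if_neg (by omega)]
          have hpe : decide (PairUpto cs i) = decide (PairUpto cs (i + 1)) := by
            apply decide_eq_decide.mpr
            constructor
            · rintro ⟨k, h2, j, hjk, h1, h3, h4, h5⟩; exact ⟨k, by omega, j, hjk, h1, h3, h4, h5⟩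
            · intro h
              rcases (pairUpto_succ cs i).mp h with ⟨-, j, h1, h4, h5⟩ | h
              · have hkeq : keyStr cs j = keyStr cs i := keyStr_congr h4 h5
                have hge : ¬ j < j₀ := fun hc' => hj₀min j hc' hkeq
                omega
              · exact h
          rw [hpe]
          exact ⟨d, rfl, hdinv⟩
        · rw [if_pos (by omega)]
          have hp2 : PairUpto cs (i + 1) := by
            obtain ⟨h4, h5⟩ := keyStr_inj hj₀key
            exact ⟨i, by omega, j₀, by omega, by omega, hlt, h4, h5⟩
          rw [show (true : Bool) = decide (PairUpto cs (i + 1)) from (decide_eq_true hp2).symm]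
          exact ⟨d, rfl, hdinv⟩
      · -- first occurrence of this pair: record it
        rw [if_pos hct]
        have hpe : decide (PairUpto cs i) = decide (PairUpto cs (i + 1)) := by
          apply decide_eq_decide.mpr
          constructor
          · rintro ⟨k, h2, j, hjk, h1, h3, h4, h5⟩; exact ⟨k, by omega, j, hjk, h1, h3, h4, h5⟩
          · intro h
            rcases (pairUpto_succ cs i).mp h with ⟨-, j, h1, h4, h5⟩ | h
            · have hkeq : keyStr cs j = keyStr cs i := keyStr_congr h4 h5
              exact absurd ((hc _).mpr ⟨j, by omega, hkeq⟩) hct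
            · exact h
        rw [hpe]
        refine ⟨_, rfl, ?_, ?_⟩
        · intro p
          rw [PySem.Dict.contains_insert]
          constructor
          · intro hor
            rcases Bool.or_eq_true_iff.mp hor with h | h
            · exact ⟨i, by omega, (beq_iff_eq.mp h).symm⟩
            · obtain ⟨j, hj, hk⟩ := (hc p).mp h
              exact ⟨j, by omega, hk⟩
          · rintro ⟨j, hj, hk⟩
            rcases Nat.lt_or_ge j i with h | h
            · exact Bool.or_eq_true_iff.mpr (Or.inr ((hc p).mpr ⟨j, by omega, hk⟩))
            · have hji : j = i := by omega
              subst hji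
              exact Bool.or_eq_true_iff.mpr (Or.inl (beq_iff_eq.mpr hk.symm))
        · intro p w hw
          rw [PySem.Dict.get?_insert] at hw
          by_cases hp : p = keyStr cs i
          · rw [if_pos hp] at hw
            injection hw with hw
            refine ⟨i, by omega, hp.symm, ?_, ?_⟩
            · intro j' hj' hk
              rw [hp] at hk
              exact absurd ((hc _).mpr ⟨j', by omega, hk⟩) hct
            · rw [← hw, hp]
              norm_cast
          · rw [if_neg hp] at hw
            obtain ⟨j, hj, h2, h3, h4⟩ := hg p w hw
            exact ⟨j, by omega, h2, h3, h4⟩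

lemma bool_eq_decide {p : Prop} [Decidable p] {b : Bool} (h : b = true ↔ p) : b = decide p := by
  cases b
  · have hnp : ¬ p := fun hp => by simpa using h.mpr hp
    simp [hnp]
  · simp [h.mp rfl]

lemma portA_eq (string : String) :
    checkNiceness string
      = (decide (GapUpto string.toList string.toList.length)
          && decide (PairUpto string.toList string.toList.length)) := by
  obtain ⟨d, hf, -⟩ := invariant string.toList string.toList.length le_rfl
  unfold checkNiceness
  dsimp only
  rw [PySem.Str.len_eq, PySem.List.pyRange_zero_nat, List.foldl_map, hf]

lemma infix_pair_iff (a b : Char) (l : List Char) :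
    [a, b] <:+: l ↔ ∃ m, m + 1 < l.length ∧ l.getD m ' ' = a ∧ l.getD (m + 1) ' ' = b := by
  constructor
  · rintro ⟨s, t, h⟩
    refine ⟨s.length, ?_, ?_, ?_⟩
    · rw [← h]; simp
    · rw [← h]; simp [List.getD_eq_getElem?_getD]
    · rw [← h]; simp [List.getD_eq_getElem?_getD]
  · rintro ⟨m, hm, ha, hb⟩
    have h1 : m < l.length := by omega
    refine ⟨l.take m, l.drop (m + 2), ?_⟩
    conv_rhs => rw [← List.take_append_drop m l]
    rw [List.drop_eq_getElem_cons h1, List.drop_eq_getElem_cons hm]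
    rw [List.getD_eq_getElem l ' ' h1] at ha
    rw [List.getD_eq_getElem l ' ' hm] at hb
    simp [← ha, ← hb]

lemma getD_drop (cs : List Char) (d t : Nat) (ht : d + t < cs.length) :
    (cs.drop d).getD t ' ' = cs.getD (d + t) ' ' := by
  rw [List.getD_eq_getElem _ _ (by simp; omega), List.getD_eq_getElem _ _ ht]
  simp

lemma gapB_eq (cs : List Char) :
    ((PySem.List.pyRange 0 ((cs.length : Int) - 2)).any (fun i =>
        PySem.List.pyGetD cs i ' ' == PySem.List.pyGetD cs (i + 2) ' '))
      = decide (GapUpto cs cs.length) := by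
  apply bool_eq_decide
  rw [List.any_eq_true]
  constructor
  · rintro ⟨x, hmem, hbeq⟩
    rw [PySem.List.mem_pyRange_one] at hmem
    obtain ⟨h0, hx⟩ := hmem
    lift x to ℕ using h0 with k
    rw [beq_iff_eq, show ((k : Int) + 2) = ((k + 2 : Nat) : Int) from by push_cast; ring] at hbeq
    simp only [PySem.List.pyGetD_natCast] at hbeq
    exact ⟨k, by omega, by omega, hbeq⟩
  · rintro ⟨k, hk, h2, heq⟩
    refine ⟨(k : Int), ?_, ?_⟩
    · rw [PySem.List.mem_pyRange_one]; omega
    · rw [beq_iff_eq, show ((k : Int) + 2) = ((k + 2 : Nat) : Int) from by push_cast; ring]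
      simp only [PySem.List.pyGetD_natCast]
      exact heq

lemma pair_body_iff (cs : List Char) (k : Nat) (hk : k + 1 < cs.length) :
    (PySem.Chars.isIn (PySem.List.slice cs (some (k : Int)) (some ((k : Int) + 2)))
        (PySem.List.slice cs (some ((k : Int) + 2)) none)) = true
      ↔ ∃ k', k + 2 ≤ k' ∧ k' + 1 < cs.length ∧
          cs.getD k ' ' = cs.getD k' ' ' ∧ cs.getD (k + 1) ' ' = cs.getD (k' + 1) ' ' := by
  have hk0 : k < cs.length := by omega
  rw [show ((k : Int) + 2) = ((k + 2 : Nat) : Int) from by push_cast; ring,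
    PySem.List.slice_natCast, PySem.List.slice_from_natCast,
    show k + 2 - k = 2 from by omega,
    show (cs.drop k).take 2 = [cs[k], cs[k+1]] from by
      rw [List.drop_eq_getElem_cons hk0, List.drop_eq_getElem_cons hk]; rfl,
    PySem.Chars.isIn_iff_infix, infix_pair_iff]
  constructor
  · rintro ⟨m, hm, ha, hb⟩
    rw [List.length_drop] at hm
    rw [getD_drop cs (k + 2) m (by omega)] at ha
    rw [getD_drop cs (k + 2) (m + 1) (by omega)] at hb
    refine ⟨k + 2 + m, by omega, by omega, ?_, ?_⟩
    · rw [List.getD_eq_getElem _ _ hk0]; exact ha.symm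
    · rw [List.getD_eq_getElem _ _ hk]
      rw [show k + 2 + (m + 1) = k + 2 + m + 1 from by omega] at hb
      exact hb.symm
  · rintro ⟨k', h1, h2, h3, h4⟩
    refine ⟨k' - (k + 2), ?_, ?_, ?_⟩
    · rw [List.length_drop]; omega
    · rw [getD_drop cs (k + 2) (k' - (k + 2)) (by omega),
        show k + 2 + (k' - (k + 2)) = k' from by omega,
        List.getD_eq_getElem _ _ hk0] at *
      exact h3.symm
    · rw [getD_drop cs (k + 2) (k' - (k + 2) + 1) (by omega),
        show k + 2 + (k' - (k + 2) + 1) = k' + 1 from by omega,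
        List.getD_eq_getElem _ _ hk] at *
      exact h4.symm

lemma pairB_eq (cs : List Char) :
    ((PySem.List.pyRange 0 ((cs.length : Int) - 1)).any (fun i =>
        PySem.Chars.isIn (PySem.List.slice cs (some i) (some (i + 2)))
          (PySem.List.slice cs (some (i + 2)) none)))
      = decide (PairUpto cs cs.length) := by
  apply bool_eq_decide
  rw [List.any_eq_true]
  constructor
  · rintro ⟨x, hmem, hbody⟩
    rw [PySem.List.mem_pyRange_one] at hmem
    obtain ⟨h0, hx⟩ := hmem
    lift x to ℕ using h0 with k
    have hk : k + 1 < cs.length := by omega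
    obtain ⟨k', h1, h2, h3, h4⟩ := (pair_body_iff cs k hk).mp hbody
    exact ⟨k', by omega, k, by omega, h1, h2, h3, h4⟩
  · rintro ⟨k', h2, j, hjk, h1, h3, h4, h5⟩
    refine ⟨(j : Int), ?_, ?_⟩
    · rw [PySem.List.mem_pyRange_one]; omega
    · exact (pair_body_iff cs j (by omega)).mpr ⟨k', h1, h3, h4, h5⟩

lemma portB_eq (string : String) :
    checkNiceness_alt string
      = (decide (GapUpto string.toList string.toList.length)
          && decide (PairUpto string.toList string.toList.length)) := by
  unfold checkNiceness_alt
  dsimp only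
  rw [PySem.Str.len_eq, gapB_eq, pairB_eq]

-- ===== VERDICT (by name: the statement is the Claim_ definition above) =====
theorem checkNiceness_spec : Claim_equal_checkNiceness := by
  intro string _
  unfold Spec_checkNiceness
  rw [portA_eq, portB_eq]
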